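-- pv_equiv track=rewrite | github.com/maxrubintoles/Conformal_LM_Reasoning | src/gold_annos.py | generate_legal_subgraphs
-- ===== SOURCE A (Python) =====
-- import itertools
--
-- def get_ancestors(graph, node):
--     ancestors = set()
--
--     def visit(i):
--         row = graph[i]
--         for j in range(len(row)):
--             if row[j] == 1 and j not in ancestors:
--                 ancestors.add(j)
--                 visit(j)
--
--     visit(node)
--     return ancestors
--
-- def generate_legal_subgraphs(graph):
--     nodes = range(len(graph))
--     legal_subgraphs = []
--     for size in range(1, len(nodes) + 1):
--         for subset in itertools.combinations(nodes, size):
--             if all(get_ancestors(graph, node).issubset(subset) for node in subset):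
--                 legal_subgraphs.append([1 if i in subset else 0 for i in nodes])
--     return legal_subgraphs
-- ===== SOURCE B (Python) =====
-- def _ancestors(graph, node):
--     # textually the module's get_ancestors DFS; B's change is elsewhere
--     ancestors = set()
--
--     def visit(i):
--         row = graph[i]
--         for j in range(len(row)):
--             if row[j] == 1 and j not in ancestors:
--                 ancestors.add(j)
--                 visit(j)
--
--     visit(node)
--     return ancestors
--
--
-- def generate_legal_subgraphs(graph):
--     n = len(graph)
--     # closure of every node computed once (A recomputes a DFS per (subset, node))
--     anc = [_ancestors(graph, i) for i in range(n)]
--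
--     def all_subsets(nodes):
--         # include-first recursion: within each size this order is lexicographic
--         if not nodes:
--             return [[]]
--         rest = all_subsets(nodes[1:])
--         return [[nodes[0]] + s for s in rest] + rest
--
--     buckets = [[] for _ in range(n)]  # counting buckets replace the size-nested loops
--     for subset in all_subsets(list(range(n))):
--         if subset:
--             ss = set(subset)
--             if all(anc[i] <= ss for i in subset):
--                 buckets[len(subset) - 1].append([1 if i in ss else 0 for i in range(n)])
--     return [vec for b in buckets for vec in b]
-- ===== Notes on version B (the rewrite author's own statement) =====
-- stated objective: alternative
-- what changed: B computes each node's ancestor closure once up front, enumerates all subsets by a single include-first recursion, and distributes the legal ones into per-size counting buckets, instead of A's size-nested itertools.combinations loops that re-run a DFS for every (subset, node) pair; both still enumerate all 2^n subsets.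
import Mathlib
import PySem

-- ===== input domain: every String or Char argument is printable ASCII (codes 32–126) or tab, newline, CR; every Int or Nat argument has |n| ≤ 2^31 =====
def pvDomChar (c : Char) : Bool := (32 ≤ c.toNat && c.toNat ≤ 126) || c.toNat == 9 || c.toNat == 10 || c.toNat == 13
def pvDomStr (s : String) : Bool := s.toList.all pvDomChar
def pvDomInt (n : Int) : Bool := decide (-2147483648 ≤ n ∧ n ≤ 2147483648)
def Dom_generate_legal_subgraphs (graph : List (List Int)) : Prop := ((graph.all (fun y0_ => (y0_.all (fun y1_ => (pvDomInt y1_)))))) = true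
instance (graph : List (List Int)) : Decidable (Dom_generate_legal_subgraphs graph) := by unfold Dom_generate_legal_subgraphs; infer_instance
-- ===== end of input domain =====

-- B precomputes each node's ancestor closure once and fills size buckets from a single
-- recursive subset enumeration, instead of A's per-(subset,node) DFS inside size-nested
-- combination loops (objective: alternative algorithm, same exponential enumeration).

-- ===== PORT A =====
-- get_ancestors' inner `visit`: recursive DFS over a shared visited set.  The fuel
-- graph.length + 1 bounds the nesting depth exactly on inputs satisfying Pre_ (each
-- nested call first adds a fresh node index < graph.length to the set).
def pvVisit (g : List (List Int)) : Nat → PySem.Set Int → Int → PySem.Set Int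
  | 0, anc, _ => anc
  | fuel+1, anc, i =>
    match PySem.List.pyGet? g i with
    | none => anc      -- Python raises IndexError here; excluded by Pre_
    | some row =>
      (List.range row.length).foldl
        (fun anc j =>
          if row.getD j 0 == 1 && !(PySem.Set.contains anc (Int.ofNat j)) then
            pvVisit g fuel (PySem.Set.add anc (Int.ofNat j)) (Int.ofNat j)
          else anc)
        anc

def get_ancestors (g : List (List Int)) (node : Int) : PySem.Set Int :=
  pvVisit g (g.length + 1) PySem.Set.empty node

-- itertools.combinations(pool, r): the r-subsets of the pool in lexicographic order
def pvComb : List Int → Nat → List (List Int)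
  | _, 0 => [[]]
  | [], _+1 => []
  | x :: t, s+1 => (pvComb t s).map (fun c => x :: c) ++ pvComb t (s+1)

def generate_legal_subgraphs (graph : List (List Int)) : List (List Int) :=
  let nodes : List Int := (List.range graph.length).map (fun (i : Nat) => (i : Int))
  (List.range' 1 graph.length).foldl
    (fun acc size =>
      acc ++
        ((pvComb nodes size).filter (fun subset =>
            subset.all (fun node =>
              PySem.Set.issubset (get_ancestors graph node) (PySem.Set.ofList subset)))).map
          (fun subset => nodes.map (fun i => if subset.contains i then (1:Int) else 0)))
    []

-- ===== PORT B =====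
-- Source B's _ancestors is textually the module's get_ancestors, so its port is the same
-- function get_ancestors above, reused.

-- Source B's all_subsets: include-first recursion over the node list
def pvAllSubsets : List Int → List (List Int)
  | [] => [[]]
  | x :: t => (pvAllSubsets t).map (fun s => x :: s) ++ pvAllSubsets t

-- the body of Source B's `for subset in all_subsets(...)` loop
def pvStep (anc : List (PySem.Set Int)) (n : Nat)
    (bks : List (List (List Int))) (subset : List Int) : List (List (List Int)) :=
  if subset = [] then bks
  else
    let ss := PySem.Set.ofList subset
    -- anc[i]: the index is always in range here (subset ⊆ range(n)), so getD's default is never used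
    if subset.all (fun i =>
        PySem.Set.issubset ((PySem.List.pyGet? anc i).getD PySem.Set.empty) ss) then
      bks.set (subset.length - 1)
        (bks.getD (subset.length - 1) [] ++
          [(List.range n).map (fun (i : Nat) => if PySem.Set.contains ss (i : Int) then (1:Int) else 0)])
    else bks

def generate_legal_subgraphs_alt (graph : List (List Int)) : List (List Int) :=
  let n := graph.length
  let anc : List (PySem.Set Int) := (List.range n).map (fun (i : Nat) => get_ancestors graph (i : Int))
  let final := (pvAllSubsets ((List.range n).map (fun (i : Nat) => (i : Int)))).foldl
    (pvStep anc n) (List.replicate n [])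
  final.flatten

-- ===== PRECONDITION & SPEC =====
-- Pre_ excludes exactly the graphs with an edge entry 1 in some column j ≥ len(graph):
-- there Python's get_ancestors dereferences graph[j] and raises IndexError (always
-- reached, since every node is the start of a size-1 subset check).
def Pre_generate_legal_subgraphs (graph : List (List Int)) : Prop :=
  ∀ row ∈ graph, ∀ j ∈ List.range row.length, row.getD j 0 = 1 → j < graph.length
instance (graph : List (List Int)) : Decidable (Pre_generate_legal_subgraphs graph) := by
  unfold Pre_generate_legal_subgraphs; infer_instance

def pvWitness_generate_legal_subgraphs : List (List Int) := [[0, 1], [0, 0]]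

def Spec_generate_legal_subgraphs (graph : List (List Int)) (out : List (List Int)) : Prop := out = generate_legal_subgraphs_alt graph
instance (graph : List (List Int)) (out : List (List Int)) : Decidable (Spec_generate_legal_subgraphs graph out) := by unfold Spec_generate_legal_subgraphs; infer_instance

-- ===== CLAIM (what is proved, stated in full; the proofs are below) =====
def Claim_equal_generate_legal_subgraphs : Prop := ∀ (graph : List (List Int)), Dom_generate_legal_subgraphs graph → Pre_generate_legal_subgraphs graph → Spec_generate_legal_subgraphs graph (generate_legal_subgraphs graph)

-- ===== LEMMAS AND PROOFS =====

-- the legality check both programs perform, as one predicate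
def pvChk (graph : List (List Int)) (s : List Int) : Bool :=
  s.all (fun node => PySem.Set.issubset (get_ancestors graph node) (PySem.Set.ofList s))

-- the indicator vector both programs emit
def pvInd (n : Nat) (s : List Int) : List Int :=
  (List.range n).map (fun (i : Nat) => if PySem.Set.contains (PySem.Set.ofList s) (i : Int) then (1:Int) else 0)

-- B's keep-condition as a Bool predicate
def pvKeep (anc : List (PySem.Set Int)) (s : List Int) : Bool :=
  !(s == []) && s.all (fun i =>
    PySem.Set.issubset ((PySem.List.pyGet? anc i).getD PySem.Set.empty) (PySem.Set.ofList s))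

theorem pv_mem_allSubsets {xs : List Int} {t : List Int} (h : t ∈ pvAllSubsets xs) :
    (∀ x ∈ t, x ∈ xs) ∧ t.length ≤ xs.length := by
  induction xs generalizing t with
  | nil =>
    simp only [pvAllSubsets, List.mem_singleton] at h
    subst h; simp
  | cons x xs ih =>
    simp only [pvAllSubsets, List.mem_append, List.mem_map] at h
    rcases h with ⟨u, hu, rfl⟩ | h
    · obtain ⟨h1, h2⟩ := ih hu
      refine ⟨?_, by simpa using Nat.succ_le_succ h2⟩
      intro y hy
      rcases List.mem_cons.mp hy with rfl | hy
      · exact List.mem_cons_self ..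
      · exact List.mem_cons_of_mem _ (h1 y hy)
    · obtain ⟨h1, h2⟩ := ih h
      exact ⟨fun y hy => List.mem_cons_of_mem _ (h1 y hy), Nat.le_succ_of_le h2⟩

theorem pv_beq_succ (a b : Nat) : (a + 1 == b + 1) = (a == b) := by
  rw [Bool.eq_iff_iff]; simp

theorem pv_filter_length_allSubsets (xs : List Int) (s : Nat) :
    (pvAllSubsets xs).filter (fun t => t.length == s) = pvComb xs s := by
  induction xs generalizing s with
  | nil => cases s <;> simp [pvAllSubsets, pvComb]
  | cons x t ih =>
    cases s with
    | zero =>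
      simp [pvAllSubsets, pvComb, List.filter_append, List.filter_map, Function.comp, ih 0]
    | succ s' =>
      simp only [pvAllSubsets, pvComb, List.filter_append, List.filter_map]
      rw [← ih s', ← ih (s' + 1)]
      congr 1
      apply congrArg
      apply List.filter_congr
      intro u _
      simp only [Function.comp_apply, List.length_cons]
      exact pv_beq_succ u.length s'

theorem pv_all_congr {α : Type} (l : List α) (f g : α → Bool) (h : ∀ x ∈ l, f x = g x) :
    l.all f = l.all g := by
  induction l with
  | nil => rfl
  | cons a t ih =>
    simp only [List.all_cons, h a (List.mem_cons_self ..),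
      ih (fun x hx => h x (List.mem_cons_of_mem _ hx))]

theorem pv_foldl_pvStep (anc : List (PySem.Set Int)) (n : Nat)
    (L : List (List Int)) (bks : List (List (List Int)))
    (hlen : ∀ s ∈ L, s.length ≤ bks.length) :
    L.foldl (pvStep anc n) bks =
      (List.range bks.length).map (fun k =>
        bks.getD k [] ++ ((L.filter (fun s => pvKeep anc s && (s.length == k + 1))).map (pvInd n))) := by
  revert hlen
  induction L generalizing bks with
  | nil =>
    intro _
    simp only [List.foldl_nil, List.filter_nil, List.map_nil, List.append_nil]
    apply List.ext_getElem (by simp)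
    intro k h1 h2
    have hk : k < bks.length := h1
    simp [List.getD_eq_getElem?_getD, List.getElem?_eq_getElem hk]
  | cons a L ih =>
    intro hlen
    have hlen' : ∀ s ∈ L, s.length ≤ bks.length :=
      fun s hs => hlen s (List.mem_cons_of_mem _ hs)
    by_cases hk : pvKeep anc a = true
    · -- a is kept
      have ha : a ≠ [] := by
        intro h; subst h; simp [pvKeep] at hk
      have hchk : (a.all (fun i =>
          PySem.Set.issubset ((PySem.List.pyGet? anc i).getD PySem.Set.empty)
            (PySem.Set.ofList a))) = true := by
        unfold pvKeep at hk
        exact ((Bool.and_eq_true _ _).mp hk).2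
      have hapos : 0 < a.length := List.length_pos_iff.mpr ha
      have hm : a.length - 1 < bks.length := by
        have := hlen a (List.mem_cons_self ..); omega
      have hstep : pvStep anc n bks a =
          bks.set (a.length - 1) (bks.getD (a.length - 1) [] ++ [pvInd n a]) := by
        simp only [pvStep, pvInd]
        rw [if_neg ha, if_pos hchk]
      rw [List.foldl_cons, hstep,
        ih _ (by rw [List.length_set]; exact hlen'), List.length_set]
      apply List.map_congr_left
      intro k hkr
      have hk' : k < bks.length := List.mem_range.mp hkr
      by_cases hkm : k = a.length - 1
      · subst hkm
        have hbeq : (a.length == a.length - 1 + 1) = true := by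
          simp only [beq_iff_eq]; omega
        rw [List.filter_cons, if_pos (by rw [hk, hbeq]; rfl)]
        rw [List.map_cons]
        rw [List.getD_eq_getElem?_getD, List.getElem?_set_self hk', Option.getD_some]
        simp
      · have hbeq : (a.length == k + 1) = false := by
          simp only [beq_eq_false_iff_ne, ne_eq]
          omega
        rw [List.filter_cons, if_neg (by rw [hbeq, Bool.and_false]; simp)]
        rw [List.getD_eq_getElem?_getD, List.getElem?_set_ne (Ne.symm hkm),
          ← List.getD_eq_getElem?_getD]
    · -- a is dropped
      have hk0 : pvKeep anc a = false := by
        cases h : pvKeep anc a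
        · rfl
        · exact absurd h hk
      have hstep : pvStep anc n bks a = bks := by
        by_cases ha : a = []
        · simp only [pvStep]
          rw [if_pos ha]
        · have hfalse : (a.all (fun i =>
              PySem.Set.issubset ((PySem.List.pyGet? anc i).getD PySem.Set.empty)
                (PySem.Set.ofList a))) = false := by
            cases hall : (a.all (fun i =>
              PySem.Set.issubset ((PySem.List.pyGet? anc i).getD PySem.Set.empty)
                (PySem.Set.ofList a)))
            · rfl
            · exfalso
              apply hk
              unfold pvKeep
              rw [hall]
              simp [ha]
          simp only [pvStep]
          rw [if_neg ha, if_neg (by rw [hfalse]; simp)]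
      rw [List.foldl_cons, hstep, ih _ hlen']
      apply List.map_congr_left
      intro k _
      rw [List.filter_cons, if_neg (by rw [hk0, Bool.false_and]; simp)]

theorem pv_contains_ofList (s : List Int) (x : Int) :
    PySem.Set.contains (PySem.Set.ofList s) x = s.contains x := by
  by_cases h : x ∈ s
  · have h1 : PySem.Set.contains (PySem.Set.ofList s) x = true :=
      (PySem.Set.contains_iff _ _).mpr ((PySem.Set.mem_ofList s x).mpr h)
    have h2 : s.contains x = true := List.contains_iff_mem.mpr h
    rw [h1, h2]
  · have h1 : PySem.Set.contains (PySem.Set.ofList s) x = false := by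
      rw [Bool.eq_false_iff]
      intro hc
      exact h ((PySem.Set.mem_ofList s x).mp ((PySem.Set.contains_iff _ _).mp hc))
    have h2 : s.contains x = false := by
      rw [Bool.eq_false_iff]
      intro hc
      exact h (List.contains_iff_mem.mp hc)
    rw [h1, h2]

theorem pv_A_eq (graph : List (List Int)) :
    generate_legal_subgraphs graph =
      (List.range graph.length).flatMap (fun k =>
        ((pvComb ((List.range graph.length).map (fun (i : Nat) => (i : Int))) (1 + k)).filter
          (pvChk graph)).map (pvInd graph.length)) := by
  simp only [generate_legal_subgraphs]
  rw [PySem.List.foldl_append_eq_flatMap, List.range'_eq_map_range]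
  simp only [List.nil_append, List.flatMap_def, List.map_map]
  apply congrArg List.flatten
  apply List.map_congr_left
  intro k _
  simp only [Function.comp]
  apply List.map_congr_left
  intro s _
  simp only [pvInd]
  apply List.map_congr_left
  intro i _
  simp only [Function.comp_apply, pv_contains_ofList]

theorem pv_B_eq (graph : List (List Int)) :
    generate_legal_subgraphs_alt graph =
      (List.range graph.length).flatMap (fun k =>
        ((pvAllSubsets ((List.range graph.length).map (fun (i : Nat) => (i : Int)))).filter
          (fun s => pvKeep ((List.range graph.length).map (fun (i : Nat) => get_ancestors graph (i : Int))) s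
                    && (s.length == k + 1))).map (pvInd graph.length)) := by
  simp only [generate_legal_subgraphs_alt]
  rw [pv_foldl_pvStep _ _ _ _ (by
    intro s hs
    rw [List.length_replicate]
    have := (pv_mem_allSubsets hs).2
    simpa using this)]
  rw [List.length_replicate, List.flatMap_def]
  apply congrArg List.flatten
  apply List.map_congr_left
  intro k hkr
  have hk : k < graph.length := List.mem_range.mp hkr
  rw [List.getD_eq_getElem?_getD, List.getElem?_replicate, if_pos hk]
  simp

theorem pv_keep_eq_chk (graph : List (List Int)) (k : Nat) (s : List Int)
    (hmem : ∀ x ∈ s, x ∈ (List.range graph.length).map (fun (i : Nat) => (i : Int))) :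
    (pvKeep ((List.range graph.length).map (fun (i : Nat) => get_ancestors graph (i : Int))) s
      && (s.length == k + 1))
    = (pvChk graph s && (s.length == k + 1)) := by
  by_cases hl : s.length = k + 1
  · have hne : s ≠ [] := by
      intro h; subst h; simp at hl
    have hb : (s == []) = false := by
      simpa using hne
    unfold pvKeep pvChk
    rw [hb]
    simp only [Bool.not_false, Bool.true_and]
    congr 1
    apply pv_all_congr
    intro x hx
    obtain ⟨j, hj, rfl⟩ := by
      simpa using hmem x hx
    rw [PySem.List.pyGet?_natCast]
    rw [List.getElem?_map, List.getElem?_range hj]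
    rfl
  · have hb : (s.length == k + 1) = false := by
      simpa using hl
    rw [hb]
    simp

-- ===== VERDICT (by name: the statement is the Claim_ definition above) =====
theorem generate_legal_subgraphs_spec : Claim_equal_generate_legal_subgraphs := by
  intro graph _ _
  unfold Spec_generate_legal_subgraphs
  rw [pv_A_eq, pv_B_eq]
  simp only [List.flatMap_def]
  apply congrArg List.flatten
  apply List.map_congr_left
  intro k _
  rw [List.filter_congr (fun s hs => pv_keep_eq_chk graph k s (pv_mem_allSubsets hs).1)]
  rw [← List.filter_filter (p := pvChk graph) (q := fun s => s.length == k + 1)]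
  rw [pv_filter_length_allSubsets]
  rw [Nat.add_comm 1 k]
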